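-- pv_equiv track=rewrite | github.com/RegoNoShi/CodeJam2021 | QualificationRound/MoonsAndUmbrellas.py | cost
-- ===== SOURCE A (Python) =====
-- def cost(x, y, s):
--     prev = None
--     count = 0
--     for c in s:
--         if prev == 'C' and c == 'J':
--             count += x
--         elif prev == 'J' and c == 'C':
--             count += y
--         prev = c
--     return count
-- ===== SOURCE B (Python) =====
-- def cost(x, y, s):
--     return x * s.count('CJ') + y * s.count('JC')
-- ===== Notes on version B (the rewrite author's own statement) =====
-- stated objective: simpler
-- what changed: Replaces the stateful prev-tracking character loop with a stateless closed-form expression: two library substring counts of 'CJ' and 'JC' (which cannot self-overlap, so non-overlapping counts equal the number of adjacent transitions); str.count's C-level scan gives a constant-factor speedup.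
import Mathlib
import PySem

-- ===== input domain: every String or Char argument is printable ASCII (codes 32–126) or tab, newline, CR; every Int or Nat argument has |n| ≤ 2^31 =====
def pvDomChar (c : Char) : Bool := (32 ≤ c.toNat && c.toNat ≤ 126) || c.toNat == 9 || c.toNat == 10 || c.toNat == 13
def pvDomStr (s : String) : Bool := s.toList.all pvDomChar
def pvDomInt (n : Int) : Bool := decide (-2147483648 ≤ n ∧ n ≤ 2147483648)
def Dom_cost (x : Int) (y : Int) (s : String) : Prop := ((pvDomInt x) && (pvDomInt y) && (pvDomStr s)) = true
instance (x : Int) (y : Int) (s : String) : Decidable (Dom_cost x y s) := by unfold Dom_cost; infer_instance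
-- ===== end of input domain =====

-- B replaces A's stateful prev-tracking loop with a stateless closed form:
-- x * s.count('CJ') + y * s.count('JC') (objective: simpler).


-- ===== PORT A =====
-- literal port of A: fold over the characters carrying (prev, count)
def cost (x : Int) (y : Int) (s : String) : Int :=
  (s.toList.foldl
    (fun (st : Option Char × Int) c =>
      let count := if st.1 = some 'C' ∧ c = 'J' then st.2 + x
                   else if st.1 = some 'J' ∧ c = 'C' then st.2 + y
                   else st.2
      (some c, count))
    (none, 0)).2

-- ===== PORT B =====
def cost_alt (x : Int) (y : Int) (s : String) : Int :=
  x * (PySem.Str.count s "CJ" : Int) + y * (PySem.Str.count s "JC" : Int)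

-- ===== PRECONDITION & SPEC =====
def Spec_cost (x : Int) (y : Int) (s : String) (out : Int) : Prop := out = cost_alt x y s
instance (x : Int) (y : Int) (s : String) (out : Int) : Decidable (Spec_cost x y s out) := by unfold Spec_cost; infer_instance

-- ===== CLAIM (what is proved, stated in full; the proofs are below) =====
def Claim_equal_cost : Prop := ∀ (x : Int) (y : Int) (s : String), Dom_cost x y s → Spec_cost x y s (cost x y s)

-- ===== LEMMAS AND PROOFS =====

-- number of adjacent positions where (a, b) occur consecutively
def pairCount (a b : Char) : List Char → Nat
  | c :: d :: t => (if c = a ∧ d = b then 1 else 0) + pairCount a b (d :: t)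
  | _ => 0

-- sum of A's transition costs for the remaining chars, given the previous char
def transSum (x y : Int) : Option Char → List Char → Int
  | _, [] => 0
  | p, c :: t =>
      (if p = some 'C' ∧ c = 'J' then x else if p = some 'J' ∧ c = 'C' then y else 0)
        + transSum x y (some c) t

theorem foldl_cost_eq_transSum (x y : Int) (l : List Char) :
    ∀ (p : Option Char) (n : Int),
      (l.foldl
        (fun (st : Option Char × Int) c =>
          let count := if st.1 = some 'C' ∧ c = 'J' then st.2 + x
                       else if st.1 = some 'J' ∧ c = 'C' then st.2 + y
                       else st.2
          (some c, count))
        (p, n)).2 = n + transSum x y p l := by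
  induction l with
  | nil => intro p n; simp [transSum]
  | cons c t ih =>
      intro p n
      simp only [List.foldl_cons, transSum, ih]
      split_ifs <;> ring

theorem transSum_some (x y : Int) (l : List Char) :
    ∀ p : Char, transSum x y (some p) l =
      x * (pairCount 'C' 'J' (p :: l) : Int) + y * (pairCount 'J' 'C' (p :: l) : Int) := by
  induction l with
  | nil => intro p; simp [transSum, pairCount]
  | cons c t ih =>
      intro p
      simp only [transSum, ih c, pairCount]
      have hCJ : ¬ ('C' = 'J') := by decide
      rcases Decidable.em (p = 'C' ∧ c = 'J') with h1 | h1 <;>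
        rcases Decidable.em (p = 'J' ∧ c = 'C') with h2 | h2 <;>
        simp [h1, h2] <;> ring

theorem transSum_none (x y : Int) (l : List Char) :
    transSum x y none l =
      x * (pairCount 'C' 'J' l : Int) + y * (pairCount 'J' 'C' l : Int) := by
  cases l with
  | nil => simp [transSum, pairCount]
  | cons c t => simp [transSum, transSum_some]

-- pairCount drops a leading char that cannot start an (a,b) pair
theorem pairCount_cons_of_ne (a b : Char) (h : b ≠ a) (t : List Char) :
    pairCount a b (b :: t) = pairCount a b t := by
  cases t with
  | nil => simp [pairCount]
  | cons d t' => simp [pairCount, h]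

theorem go_nil (sub : List Char) (fuel acc : Nat) :
    PySem.Chars.count.go sub fuel [] acc = acc := by
  cases fuel <;> rw [PySem.Chars.count.go.eq_def]

theorem go_succ_cons (sub : List Char) (f : Nat) (c : Char) (t : List Char) (acc : Nat) :
    PySem.Chars.count.go sub (f + 1) (c :: t) acc =
      if sub.isPrefixOf (c :: t) then
        PySem.Chars.count.go sub f (List.drop sub.length (c :: t)) (acc + 1)
      else PySem.Chars.count.go sub f t acc := by
  rw [PySem.Chars.count.go.eq_def]

theorem count_go_pair (a b : Char) (hab : a ≠ b) :
    ∀ (fuel : Nat) (l : List Char) (acc : Nat), l.length ≤ fuel →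
      PySem.Chars.count.go [a, b] fuel l acc = acc + pairCount a b l := by
  intro fuel
  induction fuel with
  | zero =>
      intro l acc hl
      have : l = [] := List.eq_nil_of_length_eq_zero (Nat.le_zero.mp hl)
      subst this
      rw [go_nil]; simp [pairCount]
  | succ f ih =>
      intro l acc hl
      cases l with
      | nil => rw [go_nil]; simp [pairCount]
      | cons c t =>
          rw [go_succ_cons]
          cases t with
          | nil =>
              have : [a, b].isPrefixOf [c] = false := by simp [List.isPrefixOf]
              simp only [this, Bool.false_eq_true, if_false]
              rw [ih [] acc (by simp)]
              simp [pairCount]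
          | cons d t' =>
              by_cases h : c = a ∧ d = b
              · obtain ⟨hc, hd⟩ := h
                have hpre : [a, b].isPrefixOf (c :: d :: t') = true := by
                  simp [List.isPrefixOf, hc, hd]
                have hdrop : List.drop [a, b].length (c :: d :: t') = t' := rfl
                simp only [hpre, if_true, hdrop]
                rw [ih t' (acc + 1) (by simp at hl; omega)]
                have hpc : pairCount a b (c :: d :: t') = 1 + pairCount a b t' := by
                  rw [hc, hd]
                  simp [pairCount, pairCount_cons_of_ne a b (Ne.symm hab)]
                omega
              · have hpre : [a, b].isPrefixOf (c :: d :: t') = false := by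
                  simp [List.isPrefixOf]
                  intro hac hbd
                  exact h ⟨hac.symm, hbd.symm⟩
                simp only [hpre, Bool.false_eq_true, if_false]
                rw [ih (d :: t') acc (by simp at hl ⊢; omega)]
                have : pairCount a b (c :: d :: t') = pairCount a b (d :: t') := by
                  simp [pairCount, h]
                omega

theorem str_count_pair (s : String) (a b : Char) (hab : a ≠ b) :
    PySem.Str.count s (String.ofList [a, b]) = pairCount a b s.toList := by
  have hl : (String.ofList [a, b]).toList = [a, b] := by simp
  rw [PySem.Str.count, hl, PySem.Chars.count]
  rw [if_neg (by simp)]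
  rw [count_go_pair a b hab s.toList.length s.toList 0 (le_refl _)]
  simp

-- ===== VERDICT (by name: the statement is the Claim_ definition above) =====
theorem cost_spec : Claim_equal_cost := by
  intro x y s _
  show cost x y s = cost_alt x y s
  unfold cost cost_alt
  rw [foldl_cost_eq_transSum, transSum_none]
  rw [show ("CJ" : String) = String.ofList ['C', 'J'] from rfl,
      show ("JC" : String) = String.ofList ['J', 'C'] from rfl,
      str_count_pair s 'C' 'J' (by decide), str_count_pair s 'J' 'C' (by decide)]
  ring
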